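-- pv_equiv track=rewrite | github.com/EchoAran/interactionIR | Renderer.py | _state_summary
-- ===== SOURCE A (Python) =====
-- from typing import Any, Dict, List
--
-- def _state_summary(slots: List[Dict[str, Any]]) -> str:
--     counts = {"filled": 0, "partial": 0, "open": 0, "conflict": 0}
--     for slot in slots:
--         status = str(slot.get("status") or "")
--         if status in {"filled", "frozen"}:
--             counts["filled"] += 1
--         elif status == "partial":
--             counts["partial"] += 1
--             counts["open"] += 1
--         elif status == "conflict":
--             counts["conflict"] += 1
--             counts["open"] += 1
--         else:
--             counts["open"] += 1
--     return (
--         f"状态摘要：已明确 {counts['filled']} 个信息槽，部分明确 {counts['partial']} 个信息槽，"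
--         f"仍待处理 {counts['open']} 个信息槽，其中冲突 {counts['conflict']} 个。"
--     )
-- ===== SOURCE B (Python) =====
-- from typing import Any, Dict, List
--
-- def _state_summary(slots: List[Dict[str, Any]]) -> str:
--     statuses = [str(slot.get("status") or "") for slot in slots]
--     filled = statuses.count("filled") + statuses.count("frozen")
--     partial = statuses.count("partial")
--     conflict = statuses.count("conflict")
--     open_ = len(slots) - filled
--     return (
--         f"状态摘要：已明确 {filled} 个信息槽，部分明确 {partial} 个信息槽，"
--         f"仍待处理 {open_} 个信息槽，其中冲突 {conflict} 个。"
--     )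
-- ===== Notes on version B (the rewrite author's own statement) =====
-- stated objective: simpler
-- what changed: Replaces the single branch-per-element dict-accumulation loop by staged passes: normalize statuses once, then derive each field with independent list.count scans and open = len(slots) - filled, with no dict and no branching.
import Mathlib
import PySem

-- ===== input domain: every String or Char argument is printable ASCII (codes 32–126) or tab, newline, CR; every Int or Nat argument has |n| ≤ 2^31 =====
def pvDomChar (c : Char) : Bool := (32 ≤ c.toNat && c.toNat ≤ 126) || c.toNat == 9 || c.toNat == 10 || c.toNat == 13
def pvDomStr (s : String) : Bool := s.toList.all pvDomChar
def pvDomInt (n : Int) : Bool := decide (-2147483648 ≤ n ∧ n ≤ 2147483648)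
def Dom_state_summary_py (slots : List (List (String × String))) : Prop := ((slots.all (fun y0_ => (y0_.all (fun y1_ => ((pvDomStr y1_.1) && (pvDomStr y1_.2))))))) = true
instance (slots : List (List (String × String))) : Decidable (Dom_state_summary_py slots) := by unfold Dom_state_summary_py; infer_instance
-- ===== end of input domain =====

-- B replaces A's branch-per-element dict accumulation by staged list.count passes over the
-- normalized status list, with open = len(slots) - filled; objective: simpler.

-- status = str(slot.get("status") or "")  (values are strings, so 'or ""' maps "" and missing to "")
def pyStatus (slot : List (String × String)) : String :=
  ((PySem.Dict.mk slot).get? "status").getD ""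

-- ===== PORT A =====
def state_summary_py (slots : List (List (String × String))) : String :=
  let counts0 : PySem.Dict String Int :=
    (((PySem.Dict.empty.insert "filled" 0).insert "partial" 0).insert "open" 0).insert "conflict" 0
  let counts := slots.foldl (fun counts slot =>
    let status := pyStatus slot
    if status = "filled" ∨ status = "frozen" then
      counts.modify "filled" 0 (· + 1)
    else if status = "partial" then
      (counts.modify "partial" 0 (· + 1)).modify "open" 0 (· + 1)
    else if status = "conflict" then
      (counts.modify "conflict" 0 (· + 1)).modify "open" 0 (· + 1)
    else
      counts.modify "open" 0 (· + 1)) counts0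
  "状态摘要：已明确 " ++ PySem.Int.toStr (counts.getD "filled" 0) ++
  " 个信息槽，部分明确 " ++ PySem.Int.toStr (counts.getD "partial" 0) ++
  " 个信息槽，仍待处理 " ++ PySem.Int.toStr (counts.getD "open" 0) ++
  " 个信息槽，其中冲突 " ++ PySem.Int.toStr (counts.getD "conflict" 0) ++ " 个。"

-- ===== PORT B =====
def state_summary_py_alt (slots : List (List (String × String))) : String :=
  let statuses := slots.map pyStatus
  let filled : Int := (PySem.List.count statuses "filled" : Int) + (PySem.List.count statuses "frozen" : Int)
  let part : Int := (PySem.List.count statuses "partial" : Int)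
  let conflict : Int := (PySem.List.count statuses "conflict" : Int)
  let opn : Int := (slots.length : Int) - filled
  "状态摘要：已明确 " ++ PySem.Int.toStr filled ++
  " 个信息槽，部分明确 " ++ PySem.Int.toStr part ++
  " 个信息槽，仍待处理 " ++ PySem.Int.toStr opn ++
  " 个信息槽，其中冲突 " ++ PySem.Int.toStr conflict ++ " 个。"

-- ===== PRECONDITION & SPEC =====
def Spec_state_summary_py (slots : List (List (String × String))) (out : String) : Prop := out = state_summary_py_alt slots
instance (slots : List (List (String × String))) (out : String) : Decidable (Spec_state_summary_py slots out) := by unfold Spec_state_summary_py; infer_instance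

-- ===== CLAIM =====
def Claim_equal_state_summary_py : Prop := ∀ (slots : List (List (String × String))), Dom_state_summary_py slots → Spec_state_summary_py slots (state_summary_py slots)

-- ===== LEMMAS AND PROOFS =====

-- abbreviation for A's loop body, used only by the proofs
def aStep (counts : PySem.Dict String Int) (slot : List (String × String)) : PySem.Dict String Int :=
  let status := pyStatus slot
  if status = "filled" ∨ status = "frozen" then
    counts.modify "filled" 0 (· + 1)
  else if status = "partial" then
    (counts.modify "partial" 0 (· + 1)).modify "open" 0 (· + 1)
  else if status = "conflict" then
    (counts.modify "conflict" 0 (· + 1)).modify "open" 0 (· + 1)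
  else
    counts.modify "open" 0 (· + 1)

lemma aLoop_getD (slots : List (List (String × String))) (d : PySem.Dict String Int) :
    (slots.foldl aStep d).getD "filled" 0
      = d.getD "filled" 0 + ((slots.map pyStatus).count "filled" : Int)
          + ((slots.map pyStatus).count "frozen" : Int)
  ∧ (slots.foldl aStep d).getD "partial" 0
      = d.getD "partial" 0 + ((slots.map pyStatus).count "partial" : Int)
  ∧ (slots.foldl aStep d).getD "conflict" 0
      = d.getD "conflict" 0 + ((slots.map pyStatus).count "conflict" : Int)
  ∧ (slots.foldl aStep d).getD "open" 0
      = d.getD "open" 0 + (slots.length : Int)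
          - ((slots.map pyStatus).count "filled" : Int)
          - ((slots.map pyStatus).count "frozen" : Int) := by
  induction slots generalizing d with
  | nil => simp
  | cons x xs ih =>
    obtain ⟨ihF, ihP, ihC, ihO⟩ := ih (aStep d x)
    simp only [List.foldl_cons, List.map_cons, List.count_cons, List.length_cons] at *
    refine ⟨?_, ?_, ?_, ?_⟩ <;>
    · first
        | rw [ihF] | rw [ihP] | rw [ihC] | rw [ihO]
      unfold aStep
      by_cases hf : pyStatus x = "filled" <;>
        by_cases hz : pyStatus x = "frozen" <;>
        by_cases hp : pyStatus x = "partial" <;>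
        by_cases hc : pyStatus x = "conflict" <;>
        simp_all [PySem.Dict.getD_modify] <;> ring

-- ===== VERDICT =====
theorem state_summary_py_spec : Claim_equal_state_summary_py := by
  intro slots _
  unfold Spec_state_summary_py state_summary_py state_summary_py_alt
  have hstep : (fun (counts : PySem.Dict String Int) (slot : List (String × String)) =>
      let status := pyStatus slot
      if status = "filled" ∨ status = "frozen" then
        counts.modify "filled" 0 (· + 1)
      else if status = "partial" then
        (counts.modify "partial" 0 (· + 1)).modify "open" 0 (· + 1)
      else if status = "conflict" then
        (counts.modify "conflict" 0 (· + 1)).modify "open" 0 (· + 1)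
      else
        counts.modify "open" 0 (· + 1)) = aStep := rfl
  simp only [hstep]
  obtain ⟨hF, hP, hC, hO⟩ := aLoop_getD slots
    ((((PySem.Dict.empty.insert "filled" 0).insert "partial" 0).insert "open" 0).insert "conflict" 0)
  rw [hF, hP, hC, hO]
  norm_num [PySem.List.count_eq, PySem.Dict.getD_insert, PySem.Dict.getD_empty]
  ring_nf
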